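-- pv_equiv track=rewrite | github.com/bassetmatt-school/INF8770-TP1 | src/tp1.py | init_dict
-- ===== SOURCE A (Python) =====
-- def init_dict(msg: str) -> dict[str, str]:
--     dict_symb = {}
--     n_symb = 0
--     for i in range(len(msg)):
--         if msg[i] not in dict_symb:
--             dict_symb[msg[i]] = f"{n_symb:b}"
--             n_symb += 1
--     return dict_symb
-- ===== SOURCE B (Python) =====
-- def init_dict(msg: str) -> dict[str, str]:
--     chars = list(msg)
--     uniq = sorted(set(chars), key=chars.index)
--     return {c: f"{len(set(chars[:chars.index(c)])):b}" for c in uniq}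
-- ===== Notes on version B (the rewrite author's own statement) =====
-- stated objective: alternative
-- what changed: B has no accumulating dict or counter: it sorts the symbol set by first-occurrence index and computes each symbol's code independently as the number of distinct symbols in the prefix before its first occurrence.
import Mathlib
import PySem

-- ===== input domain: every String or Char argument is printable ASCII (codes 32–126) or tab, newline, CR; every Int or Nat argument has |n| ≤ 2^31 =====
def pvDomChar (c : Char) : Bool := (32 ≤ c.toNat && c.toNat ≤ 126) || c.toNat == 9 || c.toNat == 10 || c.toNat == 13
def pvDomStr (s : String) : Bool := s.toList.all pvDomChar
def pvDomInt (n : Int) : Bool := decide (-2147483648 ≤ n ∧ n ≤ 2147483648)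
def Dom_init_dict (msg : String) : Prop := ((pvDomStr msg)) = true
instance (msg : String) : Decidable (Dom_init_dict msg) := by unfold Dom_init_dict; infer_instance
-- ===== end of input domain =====

-- B drops A's accumulating dict and counter: it sorts the symbol set by first-occurrence index and computes each code independently as the distinct-symbol count of the prefix before that first occurrence (alternative decomposition, not faster).


-- ===== PORT A =====
-- for i in range(len(msg)): if msg[i] not in dict_symb: dict_symb[msg[i]] = f"{n_symb:b}"; n_symb += 1
def init_dict (msg : String) : List (String × String) :=
  ((msg.toList.foldl
      (fun (st : PySem.Dict String String × Int) c =>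
        if st.1.contains (String.ofList [c]) then st
        else (st.1.insert (String.ofList [c]) (PySem.Int.toBin st.2), st.2 + 1))
      (PySem.Dict.empty, 0)).1).items

-- ===== PORT B =====
-- chars = list(msg); uniq = sorted(set(chars), key=chars.index)
-- {c: f"{len(set(chars[:chars.index(c)])):b}" for c in uniq}
-- chars.index(c) is ported as (index? chars c).getD 0: exact, since every c comes from set(chars);
-- chars[:k] with the nonnegative k is the clamped take (PySem.List.slice_to_natCast).
def init_dict_alt (msg : String) : List (String × String) :=
  let chars := msg.toList.map (fun c => String.ofList [c])
  (PySem.List.sorted (PySem.Set.ofList chars)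
      (fun c => (PySem.List.index? chars c).getD 0) false).map
    (fun c => (c, PySem.Int.toBin
      ((PySem.Set.ofList (chars.take ((PySem.List.index? chars c).getD 0))).length : Int)))

-- ===== PRECONDITION & SPEC =====
def Spec_init_dict (msg : String) (out : List (String × String)) : Prop := out = init_dict_alt msg
instance (msg : String) (out : List (String × String)) : Decidable (Spec_init_dict msg out) := by unfold Spec_init_dict; infer_instance

-- ===== CLAIM (what is proved, stated in full; the proofs are below) =====
def Claim_equal_init_dict : Prop := ∀ (msg : String), Dom_init_dict msg → Spec_init_dict msg (init_dict msg)

-- ===== LEMMAS AND PROOFS =====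

-- first-occurrence index of a member is a valid index
theorem idx_lt {α : Type} [DecidableEq α] {M : List α} {a : α} (ha : a ∈ M) :
    (PySem.List.index? M a).getD 0 < M.length := by
  obtain ⟨k, hk⟩ := Option.isSome_iff_exists.mp ((PySem.List.index?_isSome_iff M a).mpr ha)
  obtain ⟨hlt, -, -⟩ := PySem.List.getElem_of_index?_eq_some hk
  rw [hk]; simpa using hlt

-- set(M ++ [x]) extends set(M) by x
theorem ofList_append_singleton {α : Type} [DecidableEq α] (M : List α) (x : α) :
    PySem.Set.ofList (M ++ [x]) = PySem.Set.add (PySem.Set.ofList M) x := by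
  simp [PySem.Set.ofList_eq_foldl, List.foldl_append]

-- the distinct symbols, in first-occurrence order, have strictly increasing first-occurrence indices
theorem ofList_pairwise_index (M : List String) :
    (PySem.Set.ofList M).Pairwise
      (fun a b => (PySem.List.index? M a).getD 0 < (PySem.List.index? M b).getD 0) := by
  induction M using List.reverseRecOn with
  | nil => simp [PySem.Set.ofList]
  | append_singleton M x ih =>
    rw [ofList_append_singleton]
    by_cases hx : x ∈ M
    · have hadd : PySem.Set.add (PySem.Set.ofList M) x = PySem.Set.ofList M := by
        simp [PySem.Set.add, PySem.Set.mem_ofList, hx]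
      rw [hadd]
      refine ih.imp_of_mem ?_
      intro a b ha hb h
      rw [PySem.List.index?_append_of_mem _ ((PySem.Set.mem_ofList _ _).mp ha),
          PySem.List.index?_append_of_mem _ ((PySem.Set.mem_ofList _ _).mp hb)]
      exact h
    · have hadd : PySem.Set.add (PySem.Set.ofList M) x = PySem.Set.ofList M ++ [x] := by
        simp [PySem.Set.add, PySem.Set.mem_ofList, hx]
      rw [hadd, List.pairwise_append]
      refine ⟨?_, by simp, ?_⟩
      · refine ih.imp_of_mem ?_
        intro a b ha hb h
        rw [PySem.List.index?_append_of_mem _ ((PySem.Set.mem_ofList _ _).mp ha),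
            PySem.List.index?_append_of_mem _ ((PySem.Set.mem_ofList _ _).mp hb)]
        exact h
      · intro a ha b hb
        simp only [List.mem_singleton] at hb
        subst hb
        rw [PySem.List.index?_append_of_mem _ ((PySem.Set.mem_ofList _ _).mp ha),
            PySem.List.index?_append_singleton_self _ _ hx]
        simpa using idx_lt ((PySem.Set.mem_ofList _ _).mp ha)

-- B's per-symbol closed form over set(M) is the enumerate of set(M)
theorem B_eq_enum (M : List String) :
    (PySem.Set.ofList M).map
      (fun c => (c, PySem.Int.toBin
        ((PySem.Set.ofList (M.take ((PySem.List.index? M c).getD 0))).length : Int)))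
    = (PySem.List.enumerate (PySem.Set.ofList M)).map
        (fun p => (p.2, PySem.Int.toBin p.1)) := by
  induction M using List.reverseRecOn with
  | nil => simp [PySem.Set.ofList, PySem.List.enumerate_nil]
  | append_singleton M x ih =>
    have hcong : ∀ c ∈ PySem.Set.ofList M,
        (c, PySem.Int.toBin
          ((PySem.Set.ofList ((M ++ [x]).take ((PySem.List.index? (M ++ [x]) c).getD 0))).length : Int))
        = (c, PySem.Int.toBin
          ((PySem.Set.ofList (M.take ((PySem.List.index? M c).getD 0))).length : Int)) := by
      intro c hc
      have hcM : c ∈ M := (PySem.Set.mem_ofList _ _).mp hc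
      rw [PySem.List.index?_append_of_mem _ hcM]
      rw [List.take_append_of_le_length (le_of_lt (idx_lt hcM))]
    rw [ofList_append_singleton]
    by_cases hx : x ∈ M
    · have hadd : PySem.Set.add (PySem.Set.ofList M) x = PySem.Set.ofList M := by
        simp [PySem.Set.add, PySem.Set.mem_ofList, hx]
      rw [hadd, List.map_congr_left hcong, ih]
    · have hadd : PySem.Set.add (PySem.Set.ofList M) x = PySem.Set.ofList M ++ [x] := by
        simp [PySem.Set.add, PySem.Set.mem_ofList, hx]
      have hidx : PySem.List.index? (M ++ [x]) x = some M.length :=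
        PySem.List.index?_append_singleton_self _ _ hx
      rw [hadd, List.map_append, List.map_congr_left hcong, ih,
          PySem.List.enumerate_append, List.map_append]
      congr 1
      simp only [PySem.List.enumerate_cons, PySem.List.enumerate_nil, List.map_cons,
        List.map_nil, hidx, Option.getD_some, List.take_left]
      simp

-- A's loop over any list of keys, started on the dict encoding an already-deduped prefix ys,
-- produces the dict encoding Set.update ys xs, with the counter equal to its size.
theorem init_dict_loop (xs ys : List String) (hnd : ys.Nodup) :
    (xs.foldl
      (fun (st : PySem.Dict String String × Int) x =>
        if st.1.contains x then st
        else (st.1.insert x (PySem.Int.toBin st.2), st.2 + 1))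
      (PySem.Dict.mk ((PySem.List.enumerate ys).map (fun p => (p.2, PySem.Int.toBin p.1))),
        (ys.length : Int)))
    = (PySem.Dict.mk ((PySem.List.enumerate (PySem.Set.update ys xs)).map
          (fun p => (p.2, PySem.Int.toBin p.1))),
        ((PySem.Set.update ys xs).length : Int)) := by
  induction xs generalizing ys with
  | nil => simp [PySem.Set.update]
  | cons x xs ih =>
    have hc : (PySem.Dict.mk ((PySem.List.enumerate ys).map
        (fun p => (p.2, PySem.Int.toBin p.1)))).contains x = decide (x ∈ ys) := by
      rw [PySem.Dict.contains_mk, List.any_map]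
      have h1 : ((PySem.List.enumerate ys 0).any
          ((fun (p : String × String) => p.1 == x) ∘ (fun p => (p.2, PySem.Int.toBin p.1))))
          = (PySem.List.enumerate ys 0).any ((fun (y : String) => y == x) ∘ (fun p => p.2)) := rfl
      rw [h1, ← List.any_map, PySem.List.map_snd_enumerate, List.any_beq']
      simp
    simp only [List.foldl_cons]
    by_cases hx : x ∈ ys
    · rw [if_pos (by simp [hc, hx])]
      rw [ih ys hnd]
      have : PySem.Set.add ys x = ys := by simp [PySem.Set.add, hx]
      simp [PySem.Set.update, this]
    · rw [if_neg (by simp [hc, hx])]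
      have hins : (PySem.Dict.mk ((PySem.List.enumerate ys).map
            (fun p => (p.2, PySem.Int.toBin p.1)))).insert x (PySem.Int.toBin (ys.length : Int))
          = PySem.Dict.mk ((PySem.List.enumerate (ys ++ [x])).map
            (fun p => (p.2, PySem.Int.toBin p.1))) := by
        apply PySem.Dict.ext
        rw [PySem.Dict.items_insert_of_not_contains _ _ (by simp [hc, hx])]
        simp [PySem.List.enumerate_append, PySem.List.enumerate_cons, PySem.List.enumerate_nil]
      rw [hins]
      have hlen : ((ys.length : Int) + 1) = (((ys ++ [x]).length : Nat) : Int) := by simp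
      rw [hlen, ih (ys ++ [x]) (by simp [List.nodup_append, hnd]; exact fun a ha he => hx (he ▸ ha))]
      have hadd : PySem.Set.add ys x = ys ++ [x] := by simp [PySem.Set.add, hx]
      simp [PySem.Set.update, hadd]

-- ===== VERDICT (by name: the statement is the Claim_ definition above) =====
theorem init_dict_spec : Claim_equal_init_dict := by
  intro msg _
  unfold Spec_init_dict init_dict init_dict_alt
  rw [← List.foldl_map (f := fun c => String.ofList [c])
      (g := fun (st : PySem.Dict String String × Int) x =>
        if st.1.contains x then st
        else (st.1.insert x (PySem.Int.toBin st.2), st.2 + 1))]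
  have h0 : ((PySem.Dict.empty : PySem.Dict String String), (0 : Int))
      = (PySem.Dict.mk ((PySem.List.enumerate ([] : List String)).map
          (fun p => (p.2, PySem.Int.toBin p.1))), ((([] : List String).length : Nat) : Int)) := rfl
  rw [h0, init_dict_loop _ _ List.nodup_nil]
  have hsorted : PySem.List.sorted (PySem.Set.ofList (msg.toList.map (fun c => String.ofList [c])))
      (fun c => (PySem.List.index? (msg.toList.map (fun c => String.ofList [c])) c).getD 0) false
      = PySem.Set.ofList (msg.toList.map (fun c => String.ofList [c])) := by
    apply PySem.List.sorted_eq_self_of_pairwise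
    exact (ofList_pairwise_index _).imp (fun h => Nat.le_of_lt h)
  simp only [hsorted]
  rw [B_eq_enum]
  have : PySem.Set.update ([] : List String) (msg.toList.map (fun c => String.ofList [c]))
      = PySem.Set.ofList (msg.toList.map (fun c => String.ofList [c])) := by
    simp [PySem.Set.update, PySem.Set.ofList_eq_foldl]
  simp [this]
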